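-- pv_equiv track=rewrite | github.com/samscarrow/tool-capability-protocol | tcp-knowledge-base/tcp_multi_stage_refinery.py | extract_man_sections
-- ===== SOURCE A (Python) =====
-- from typing import Dict, List, Tuple, Optional, Any
--
-- def extract_man_sections(man_page: str) -> Dict[str, str]:
--     """Extract specific sections from man page"""
--     sections = {
--         "name": "",
--         "synopsis": "",
--         "description": "",
--         "options": "",
--         "examples": "",
--         "warnings": "",
--         "security": "",
--         "see_also": ""
--     }
--
--     current_section = None
--     lines = man_page.split('\n')
--
--     for line in lines:
--         line_upper = line.strip().upper()
--
--         # Detect section headers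
--         if line_upper in ["NAME", "SYNOPSIS", "DESCRIPTION", "OPTIONS", "FLAGS",
--                          "EXAMPLES", "WARNINGS", "CAUTION", "SECURITY", "BUGS", "SEE ALSO"]:
--             if "NAME" in line_upper:
--                 current_section = "name"
--             elif "SYNOPSIS" in line_upper:
--                 current_section = "synopsis"
--             elif "DESCRIPTION" in line_upper:
--                 current_section = "description"
--             elif any(opt in line_upper for opt in ["OPTIONS", "FLAGS"]):
--                 current_section = "options"
--             elif "EXAMPLE" in line_upper:
--                 current_section = "examples"
--             elif any(warn in line_upper for warn in ["WARNING", "CAUTION", "BUGS"]):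
--                 current_section = "warnings"
--             elif "SECURITY" in line_upper:
--                 current_section = "security"
--             elif "SEE ALSO" in line_upper:
--                 current_section = "see_also"
--             continue
--
--         # Collect section content
--         if current_section and line.strip():
--             sections[current_section] += line + "\n"
--             if len(sections[current_section]) > 1000:
--                 sections[current_section] = sections[current_section][:1000] + "..."
--
--     return sections
-- ===== SOURCE B (Python) =====
-- def extract_man_sections(man_page: str) -> dict:
--     """Extract specific sections from man page"""
--     HEADER_MAP = {
--         "NAME": "name", "SYNOPSIS": "synopsis", "DESCRIPTION": "description",
--         "OPTIONS": "options", "FLAGS": "options", "EXAMPLES": "examples",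
--         "WARNINGS": "warnings", "CAUTION": "warnings", "SECURITY": "security",
--         "BUGS": "warnings", "SEE ALSO": "see_also",
--     }
--     parts = {k: [] for k in ("name", "synopsis", "description", "options",
--                              "examples", "warnings", "security", "see_also")}
--     current = None
--     for line in man_page.split('\n'):
--         sec = HEADER_MAP.get(line.strip().upper())
--         if sec is not None:
--             current = sec
--             continue
--         if current and line.strip():
--             parts[current].append(line)
--     result = {}
--     for key, lines in parts.items():
--         joined = ''.join(l + '\n' for l in lines)
--         result[key] = joined[:1000] + '...' if len(joined) > 1000 else joined
--     return result
-- ===== Notes on version B (the rewrite author's own statement) =====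
-- stated objective: simpler
-- what changed: Replaces A's header membership test plus 9-branch substring classification chain with a single header-to-section dict lookup, and replaces A's incremental string concatenation with inline re-truncation after every line by per-section line lists that are joined and truncated once after the loop.
import Mathlib
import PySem

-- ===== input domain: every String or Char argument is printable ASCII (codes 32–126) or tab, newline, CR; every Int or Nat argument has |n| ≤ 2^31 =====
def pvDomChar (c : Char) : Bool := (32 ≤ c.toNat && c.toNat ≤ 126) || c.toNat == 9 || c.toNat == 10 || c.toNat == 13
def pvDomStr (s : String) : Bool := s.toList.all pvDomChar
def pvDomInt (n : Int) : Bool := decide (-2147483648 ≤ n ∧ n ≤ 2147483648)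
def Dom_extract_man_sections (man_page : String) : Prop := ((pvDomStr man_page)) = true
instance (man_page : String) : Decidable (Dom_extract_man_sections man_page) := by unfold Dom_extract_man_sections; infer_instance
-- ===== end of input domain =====

set_option maxHeartbeats 2000000


-- B replaces A's membership-test + 9-branch classification chain by one header→section dict and A's
-- incremental string += with inline re-truncation by per-section line lists joined and truncated once
-- at the end (objective: simpler). Strings are handled as List Char (PySem.Chars), converted at the boundary.

-- ===== PORT A =====
-- the 11 recognised header lines (the literal list A tests membership in)
def pvHeadersA : List (List Char) :=
  ["NAME".toList, "SYNOPSIS".toList, "DESCRIPTION".toList, "OPTIONS".toList, "FLAGS".toList,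
   "EXAMPLES".toList, "WARNINGS".toList, "CAUTION".toList, "SECURITY".toList, "BUGS".toList,
   "SEE ALSO".toList]

-- A's if/elif classification chain (substring tests, as in the Python)
def pvClassifyA (lu : List Char) (current : Option String) : Option String :=
  if PySem.Chars.isIn "NAME".toList lu then some "name"
  else if PySem.Chars.isIn "SYNOPSIS".toList lu then some "synopsis"
  else if PySem.Chars.isIn "DESCRIPTION".toList lu then some "description"
  else if ["OPTIONS".toList, "FLAGS".toList].any (fun o => PySem.Chars.isIn o lu) then some "options"
  else if PySem.Chars.isIn "EXAMPLE".toList lu then some "examples"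
  else if ["WARNING".toList, "CAUTION".toList, "BUGS".toList].any (fun w => PySem.Chars.isIn w lu) then some "warnings"
  else if PySem.Chars.isIn "SECURITY".toList lu then some "security"
  else if PySem.Chars.isIn "SEE ALSO".toList lu then some "see_also"
  else current

-- one iteration of A's loop (sections[k] += line + "\n" is a read-modify-write: Dict.modify; the key is always present)
def pvStepA (st : PySem.Dict String (List Char) × Option String) (line : List Char) :
    PySem.Dict String (List Char) × Option String :=
  let lu := PySem.Chars.upper (PySem.Chars.strip line)
  if lu ∈ pvHeadersA then (st.1, pvClassifyA lu st.2)
  else match st.2 with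
    | some cs =>
        if PySem.Chars.strip line ≠ [] then
          (st.1.modify cs [] (fun v0 =>
            let v := v0 ++ line ++ ['\n']
            if 1000 < v.length then PySem.List.slice v none (some 1000) ++ "...".toList else v), st.2)
        else st
    | none => st

-- the sections dict A initialises (all 8 keys empty)
def pvInitSections : PySem.Dict String (List Char) := PySem.Dict.ofList
  [("name", []), ("synopsis", []), ("description", []), ("options", []),
   ("examples", []), ("warnings", []), ("security", []), ("see_also", [])]

def extract_man_sections (man_page : String) : List (String × String) :=
  let st := (PySem.Chars.splitOn man_page.toList "\n".toList).foldl pvStepA (pvInitSections, none)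
  st.1.items.map (fun p => (p.1, String.ofList p.2))

-- ===== PORT B =====
def pvHeaderMapB : PySem.Dict (List Char) String := PySem.Dict.ofList
  [("NAME".toList, "name"), ("SYNOPSIS".toList, "synopsis"), ("DESCRIPTION".toList, "description"),
   ("OPTIONS".toList, "options"), ("FLAGS".toList, "options"), ("EXAMPLES".toList, "examples"),
   ("WARNINGS".toList, "warnings"), ("CAUTION".toList, "warnings"), ("SECURITY".toList, "security"),
   ("BUGS".toList, "warnings"), ("SEE ALSO".toList, "see_also")]

-- one iteration of B's loop: dict lookup of the header, else append the line to the current section's list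
def pvStepB (st : PySem.Dict String (List (List Char)) × Option String) (line : List Char) :
    PySem.Dict String (List (List Char)) × Option String :=
  match pvHeaderMapB.get? (PySem.Chars.upper (PySem.Chars.strip line)) with
  | some sec => (st.1, some sec)
  | none => match st.2 with
    | some cs =>
        if PySem.Chars.strip line ≠ [] then (st.1.modify cs [] (fun ls => ls ++ [line]), st.2)
        else st
    | none => st

-- the per-section line lists B initialises (all 8 keys empty)
def pvInitParts : PySem.Dict String (List (List Char)) := PySem.Dict.ofList
  [("name", []), ("synopsis", []), ("description", []), ("options", []),
   ("examples", []), ("warnings", []), ("security", []), ("see_also", [])]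

def extract_man_sections_alt (man_page : String) : List (String × String) :=
  let st := (PySem.Chars.splitOn man_page.toList "\n".toList).foldl pvStepB (pvInitParts, none)
  st.1.items.map (fun p =>
    let joined := (p.2.map (fun l => l ++ ['\n'])).flatten
    (p.1, String.ofList
      (if 1000 < joined.length then PySem.List.slice joined none (some 1000) ++ "...".toList else joined)))

-- ===== PRECONDITION & SPEC =====
def Spec_extract_man_sections (man_page : String) (out : List (String × String)) : Prop := out = extract_man_sections_alt man_page
instance (man_page : String) (out : List (String × String)) : Decidable (Spec_extract_man_sections man_page out) := by unfold Spec_extract_man_sections; infer_instance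

-- ===== CLAIM (what is proved, stated in full; the proofs are below) =====
def Claim_equal_extract_man_sections : Prop := ∀ (man_page : String), Dom_extract_man_sections man_page → Spec_extract_man_sections man_page (extract_man_sections man_page)

-- ===== LEMMAS AND PROOFS =====

-- the 8 section keys, in insertion order
def pvK : List String :=
  ["name", "synopsis", "description", "options", "examples", "warnings", "security", "see_also"]

-- the truncation both programs apply (A after every append, B once at the end)
def pvT (v : List Char) : List Char :=
  if 1000 < v.length then PySem.List.slice v none (some 1000) ++ "...".toList else v

def pvJoin (ls : List (List Char)) : List Char := (ls.map (fun l => l ++ ['\n'])).flatten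

lemma pvSlice1000 (v : List Char) : PySem.List.slice v none (some 1000) = v.take 1000 := by
  rw [show ((1000 : Int)) = ((1000 : Nat) : Int) from rfl, PySem.List.slice_to_natCast]

-- re-truncating an already-truncated prefix after an append = truncating the full join once
lemma pvT_T (a b : List Char) : pvT (pvT a ++ b) = pvT (a ++ b) := by
  unfold pvT
  by_cases h : 1000 < a.length
  · rw [if_pos h]
    have hlen : ((a.take 1000 ++ "...".toList) ++ b).length = 1003 + b.length := by
      simp [List.length_take]; omega
    rw [pvSlice1000, if_pos (by rw [hlen]; omega),
        if_pos (by simp [List.length_append]; omega), pvSlice1000, pvSlice1000]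
    rw [List.append_assoc, List.take_append_of_le_length (by simp; omega),
        List.take_take, List.take_append_of_le_length (by omega)]
    simp
  · rw [if_neg h]

lemma pvJoin_snoc (ls : List (List Char)) (l : List Char) :
    pvJoin (ls ++ [l]) = pvJoin ls ++ (l ++ ['\n']) := by
  simp [pvJoin]

lemma pvK_nodup : pvK.Nodup := by decide

-- on a recognised header the dict lookup agrees with A's chain, and the result is one of the 8 keys
lemma pvHeader_agree (lu : List Char) (hm : lu ∈ pvHeadersA) (cur : Option String) :
    pvHeaderMapB.get? lu = pvClassifyA lu cur ∧ ∃ s, pvClassifyA lu cur = some s ∧ s ∈ pvK := by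
  simp only [pvHeadersA, List.mem_cons, List.not_mem_nil, or_false] at hm
  rcases hm with h | h | h | h | h | h | h | h | h | h | h <;> subst h <;>
    exact ⟨rfl, _, rfl, by decide⟩

lemma pvHeaderMapB_keys : pvHeaderMapB.keys = pvHeadersA := rfl

lemma pvHeader_none (lu : List Char) (hm : lu ∉ pvHeadersA) :
    pvHeaderMapB.get? lu = none := by
  rw [PySem.Dict.get?_eq_none_iff_not_mem_keys, pvHeaderMapB_keys]
  exact hm

-- loop invariant: same current section, same keys, and A's stored string is the truncated join of B's lines
lemma pvLoop (lines : List (List Char)) :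
    ∀ (dA : PySem.Dict String (List Char)) (dB : PySem.Dict String (List (List Char)))
      (cur : Option String),
    dA.keys = pvK → dB.keys = pvK → (∀ s, cur = some s → s ∈ pvK) →
    (∀ k ∈ pvK, dA.getD k [] = pvT (pvJoin (dB.getD k []))) →
    (lines.foldl pvStepA (dA, cur)).2 = (lines.foldl pvStepB (dB, cur)).2 ∧
    (lines.foldl pvStepA (dA, cur)).1.keys = pvK ∧
    (lines.foldl pvStepB (dB, cur)).1.keys = pvK ∧
    (∀ k ∈ pvK, (lines.foldl pvStepA (dA, cur)).1.getD k []
        = pvT (pvJoin ((lines.foldl pvStepB (dB, cur)).1.getD k []))) := by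
  induction lines with
  | nil => intro dA dB cur hA hB _ hinv; exact ⟨rfl, hA, hB, hinv⟩
  | cons line rest ih =>
    intro dA dB cur hA hB hcur hinv
    simp only [List.foldl_cons]
    by_cases hm : PySem.Chars.upper (PySem.Chars.strip line) ∈ pvHeadersA
    · obtain ⟨hget, s, hcls, hsK⟩ := pvHeader_agree _ hm cur
      have hsA : pvStepA (dA, cur) line = (dA, pvClassifyA (PySem.Chars.upper (PySem.Chars.strip line)) cur) := by
        simp [pvStepA, hm]
      have hsB : pvStepB (dB, cur) line = (dB, pvClassifyA (PySem.Chars.upper (PySem.Chars.strip line)) cur) := by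
        simp [pvStepB, hget, hcls]
      rw [hsA, hsB]
      exact ih dA dB _ hA hB (by intro t ht; rw [hcls] at ht; cases ht; exact hsK) hinv
    · have hget := pvHeader_none _ hm
      cases cur with
      | none =>
        rw [show pvStepA (dA, none) line = (dA, none) by simp [pvStepA, hm],
            show pvStepB (dB, none) line = (dB, none) by simp [pvStepB, hget]]
        exact ih dA dB none hA hB (by intro s h; cases h) hinv
      | some cs =>
        have hcsK : cs ∈ pvK := hcur cs rfl
        by_cases hst : PySem.Chars.strip line ≠ []
        · have hA1 : pvStepA (dA, some cs) line
              = (dA.insert cs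
                  (let v := dA.getD cs [] ++ line ++ ['\n']
                   if 1000 < v.length then PySem.List.slice v none (some 1000) ++ "...".toList else v),
                 some cs) := by
            simp [pvStepA, hm, hst, PySem.Dict.modify]
          have hB1 : pvStepB (dB, some cs) line
              = (dB.insert cs (dB.getD cs [] ++ [line]), some cs) := by
            simp [pvStepB, hget, hst, PySem.Dict.modify]
          rw [hA1, hB1]
          have hcA : dA.contains cs = true := (PySem.Dict.contains_iff_mem_keys dA cs).mpr (by rw [hA]; exact hcsK)
          have hcB : dB.contains cs = true := (PySem.Dict.contains_iff_mem_keys dB cs).mpr (by rw [hB]; exact hcsK)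
          refine ih _ _ _ ?_ ?_ hcur ?_
          · rw [PySem.Dict.keys_insert_of_contains _ _ hcA, hA]
          · rw [PySem.Dict.keys_insert_of_contains _ _ hcB, hB]
          · intro k hk
            rw [PySem.Dict.getD_insert, PySem.Dict.getD_insert]
            by_cases hkc : k = cs
            · rw [if_pos hkc, if_pos hkc, pvJoin_snoc, hinv cs hcsK]
              show pvT (pvT (pvJoin (dB.getD cs [])) ++ line ++ ['\n'])
                 = pvT (pvJoin (dB.getD cs []) ++ (line ++ ['\n']))
              rw [List.append_assoc, pvT_T]
            · rw [if_neg hkc, if_neg hkc]; exact hinv k hk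
        · rw [show pvStepA (dA, some cs) line = (dA, some cs) by simp [pvStepA, hm, hst],
              show pvStepB (dB, some cs) line = (dB, some cs) by simp [pvStepB, hget, hst]]
          exact ih dA dB (some cs) hA hB hcur hinv

-- the initial dictionaries satisfy the invariant on the 8 keys
lemma pvInit_inv : ∀ k ∈ pvK, pvInitSections.getD k [] = pvT (pvJoin (pvInitParts.getD k [])) := by
  intro k hk
  fin_cases hk <;> decide

-- ===== VERDICT (by name: the statement is the Claim_ definition above) =====
theorem extract_man_sections_spec : Claim_equal_extract_man_sections := by
  intro man_page _
  unfold Spec_extract_man_sections extract_man_sections extract_man_sections_alt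
  obtain ⟨h2, hkA, hkB, hv⟩ :=
    pvLoop (PySem.Chars.splitOn man_page.toList "\n".toList) pvInitSections pvInitParts none
      (by decide) (by decide) (by intro s h; cases h) pvInit_inv
  show ((PySem.Chars.splitOn man_page.toList "\n".toList).foldl pvStepA (pvInitSections, none)).1.items.map
        (fun p => (p.1, String.ofList p.2))
     = ((PySem.Chars.splitOn man_page.toList "\n".toList).foldl pvStepB (pvInitParts, none)).1.items.map
        (fun p => (p.1, String.ofList
          (if 1000 < ((p.2.map (fun l => l ++ ['\n'])).flatten).length
           then PySem.List.slice ((p.2.map (fun l => l ++ ['\n'])).flatten) none (some 1000) ++ "...".toList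
           else (p.2.map (fun l => l ++ ['\n'])).flatten)))
  rw [PySem.Dict.items_eq_map_keys _ (by rw [hkA]; exact pvK_nodup) ([] : List Char),
      PySem.Dict.items_eq_map_keys _ (by rw [hkB]; exact pvK_nodup) ([] : List (List Char)),
      hkA, hkB, List.map_map, List.map_map]
  refine List.map_congr_left ?_
  intro k hk
  simp only [Function.comp]
  have := hv k hk
  simp only [pvT, pvJoin] at this
  rw [this]
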